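-- pv_equiv track=rewrite | github.com/ShahriarKabirAyon/BRACU-CSE221-ALGORITHMS | LAB/LAB 03/Fast Matrix Drift.py | fastmatrix
-- ===== SOURCE A (Python) =====
-- def multiplication(B, C):
--     modulo=10**9+7
--     result=[[None, None],[None, None]]
--
--     result[0][0]=(B[0][0]*C[0][0]+B[0][1]*C[1][0])%modulo
--     result[0][1]=(B[0][0]*C[0][1]+B[0][1]*C[1][1])%modulo
--     result[1][0]=(B[1][0]*C[0][0]+B[1][1]*C[1][0])%modulo
--     result[1][1]=(B[1][0]*C[0][1]+B[1][1]*C[1][1])%modulo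
--
--     return result
--
-- def fastmatrix(matrix, X):
--     if X==1:
--         return matrix
--
--     dc_matrix=fastmatrix(matrix, X//2)
--
--     if X%2==0:
--         even_multiplication=multiplication(dc_matrix, dc_matrix)
--         return even_multiplication
--     else:
--         even_multiplication=multiplication(dc_matrix, dc_matrix)
--         odd_multiplication=multiplication(even_multiplication, matrix)
--         return odd_multiplication
-- ===== SOURCE B (Python) =====
-- def multiplication(B, C):
--     modulo = 10**9 + 7
--     return [
--         [(B[0][0]*C[0][0] + B[0][1]*C[1][0]) % modulo,
--          (B[0][0]*C[0][1] + B[0][1]*C[1][1]) % modulo],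
--         [(B[1][0]*C[0][0] + B[1][1]*C[1][0]) % modulo,
--          (B[1][0]*C[0][1] + B[1][1]*C[1][1]) % modulo],
--     ]
--
-- def fastmatrix(matrix, X):
--     # iterative binary exponentiation, walking the bits of X below the
--     # most-significant set bit, from high to low
--     result = matrix
--     for bit in bin(X)[3:]:
--         result = multiplication(result, result)
--         if bit == '1':
--             result = multiplication(result, matrix)
--     return result
-- ===== Notes on version B (the rewrite author's own statement) =====
-- stated objective: alternative
-- what changed: Replaced the divide-and-conquer recursion by an iterative binary exponentiation that walks the bits of X from the most-significant set bit downward, maintaining an accumulating product (same 2x2 modular multiplication).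
import Mathlib
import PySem

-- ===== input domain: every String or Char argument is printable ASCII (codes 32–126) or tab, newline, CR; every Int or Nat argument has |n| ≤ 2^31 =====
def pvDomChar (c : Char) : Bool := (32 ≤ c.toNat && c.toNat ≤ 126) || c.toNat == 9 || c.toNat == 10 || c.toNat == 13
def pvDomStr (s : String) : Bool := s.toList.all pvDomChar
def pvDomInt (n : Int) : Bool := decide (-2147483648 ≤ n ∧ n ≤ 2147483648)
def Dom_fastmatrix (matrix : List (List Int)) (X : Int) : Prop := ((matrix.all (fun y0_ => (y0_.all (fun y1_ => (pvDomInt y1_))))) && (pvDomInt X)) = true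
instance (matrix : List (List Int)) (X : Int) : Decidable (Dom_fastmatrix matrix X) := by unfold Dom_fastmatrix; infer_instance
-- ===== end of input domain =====

-- B replaces A's divide-and-conquer recursion by an iterative binary exponentiation
-- over the bits of X; equivalence is about the return value only.

-- ===== PORT A =====
-- m[i][j] for the in-range indices 0/1; exact on Pre_ (inside Pre_ the Python
-- indexing never raises), the 0-default is only reached outside Pre_.
def pvEntry (m : List (List Int)) (i j : Nat) : Int := (m.getD i []).getD j 0

def pvMultiplication (B C : List (List Int)) : List (List Int) :=
  let modulo : Int := 10 ^ 9 + 7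
  [[PySem.Int.mod (pvEntry B 0 0 * pvEntry C 0 0 + pvEntry B 0 1 * pvEntry C 1 0) modulo,
    PySem.Int.mod (pvEntry B 0 0 * pvEntry C 0 1 + pvEntry B 0 1 * pvEntry C 1 1) modulo],
   [PySem.Int.mod (pvEntry B 1 0 * pvEntry C 0 0 + pvEntry B 1 1 * pvEntry C 1 0) modulo,
    PySem.Int.mod (pvEntry B 1 0 * pvEntry C 0 1 + pvEntry B 1 1 * pvEntry C 1 1) modulo]]

-- A's recursion on X, carried on a Nat (Pre_ guarantees X ≥ 1, where Python's
-- X//2 agrees with Nat division; the n ≤ 1 arm totalises the n = 0 case that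
-- Python never returns from, outside Pre_).
def fastmatrixRec (matrix : List (List Int)) (n : Nat) : List (List Int) :=
  if n ≤ 1 then matrix
  else
    let dc := fastmatrixRec matrix (n / 2)
    if n % 2 == 0 then
      pvMultiplication dc dc
    else
      pvMultiplication (pvMultiplication dc dc) matrix

def fastmatrix (matrix : List (List Int)) (X : Int) : List (List Int) :=
  fastmatrixRec matrix X.toNat

-- ===== PORT B =====
-- bits of n, least-significant first
def pvLsbBits : Nat → List Bool
  | 0 => []
  | n + 1 => ((n + 1) % 2 == 1) :: pvLsbBits ((n + 1) / 2)

-- bin(X)[3:] as booleans: for X ≥ 0 the bits below the most-significant set bit,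
-- high to low; for X < 0 the '-' sign makes the slice keep every bit of |X|
def pvTailBits (n : Nat) : List Bool := (pvLsbBits n).reverse.tail

def pvBinSlice3 (X : Int) : List Bool :=
  if X < 0 then (pvLsbBits (-X).toNat).reverse else pvTailBits X.toNat

def fastmatrix_alt (matrix : List (List Int)) (X : Int) : List (List Int) :=
  (pvBinSlice3 X).foldl
    (fun result bit =>
      let sq := pvMultiplication result result
      if bit then pvMultiplication sq matrix else sq)
    matrix

-- ===== PRECONDITION & SPEC =====
-- Pre_ is exactly A's return domain: X ≥ 1 (A recurses forever, RecursionError,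
-- for X ≤ 0), and for X ≥ 2 the matrix must expose the 2x2 entries A indexes
-- (otherwise A raises IndexError).
def Pre_fastmatrix (matrix : List (List Int)) (X : Int) : Prop :=
  1 ≤ X ∧ (X = 1 ∨ (2 ≤ matrix.length ∧ 2 ≤ (matrix.getD 0 []).length ∧ 2 ≤ (matrix.getD 1 []).length))
instance (matrix : List (List Int)) (X : Int) : Decidable (Pre_fastmatrix matrix X) := by unfold Pre_fastmatrix; infer_instance

def pvWitness_fastmatrix : List (List Int) × Int := ([[1, 1], [1, 0]], 5)

def Spec_fastmatrix (matrix : List (List Int)) (X : Int) (out : List (List Int)) : Prop := out = fastmatrix_alt matrix X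
instance (matrix : List (List Int)) (X : Int) (out : List (List Int)) : Decidable (Spec_fastmatrix matrix X out) := by unfold Spec_fastmatrix; infer_instance

-- ===== CLAIM (what is proved, stated in full; the proofs are below) =====
def Claim_equal_fastmatrix : Prop := ∀ (matrix : List (List Int)) (X : Int), Dom_fastmatrix matrix X → Pre_fastmatrix matrix X → Spec_fastmatrix matrix X (fastmatrix matrix X)

-- ===== LEMMAS AND PROOFS =====

def pvStep (matrix : List (List Int)) (result : List (List Int)) (bit : Bool) : List (List Int) :=
  let sq := pvMultiplication result result
  if bit then pvMultiplication sq matrix else sq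

-- one iterative step starting from A's value at m is A's value at 2m+bit
theorem pvStep_rec (matrix : List (List Int)) (m : Nat) (b : Bool) (hm : 1 ≤ m) :
    pvStep matrix (fastmatrixRec matrix m) b = fastmatrixRec matrix (2 * m + (if b then 1 else 0)) := by
  have h2 : ¬ (2 * m + (if b then 1 else 0)) ≤ 1 := by cases b <;> simp <;> omega
  conv_rhs => rw [fastmatrixRec]
  have hdiv : (2 * m + (if b then 1 else 0)) / 2 = m := by cases b <;> simp <;> omega
  have hmod : (2 * m + (if b then 1 else 0)) % 2 = (if b then 1 else 0) := by
    cases b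
    · simp
    · simp
  rw [if_neg h2, hdiv, hmod]
  cases b <;> simp [pvStep]

theorem pvLsbBits_pos (n : Nat) (h : 1 ≤ n) :
    pvLsbBits n = (n % 2 == 1) :: pvLsbBits (n / 2) := by
  match n, h with
  | n + 1, _ => rw [pvLsbBits]

theorem pvLsbBits_ne_nil (n : Nat) (h : 1 ≤ n) : pvLsbBits n ≠ [] := by
  rw [pvLsbBits_pos n h]; simp

-- the key invariant: folding the tail bits of n from A's value at 1 gives A's value at n
theorem pvFold_eq (matrix : List (List Int)) (n : Nat) (h : 1 ≤ n) :
    (pvTailBits n).foldl (pvStep matrix) matrix = fastmatrixRec matrix n := by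
  induction n using Nat.strong_induction_on with
  | _ n ih =>
    by_cases h1 : n = 1
    · subst h1
      simp [pvTailBits, pvLsbBits, fastmatrixRec]
    · have h2 : 2 ≤ n := by omega
      have hhalf : 1 ≤ n / 2 := Nat.le_div_iff_mul_le (by omega) |>.mpr (by omega)
      have htail : pvTailBits n = pvTailBits (n / 2) ++ [n % 2 == 1] := by
        unfold pvTailBits
        rw [pvLsbBits_pos n h, List.reverse_cons,
          List.tail_append_of_ne_nil (by simpa using pvLsbBits_ne_nil (n / 2) hhalf)]
      rw [htail, List.foldl_append, ih (n / 2) (by omega) hhalf]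
      have := pvStep_rec matrix (n / 2) (n % 2 == 1) hhalf
      simp only [List.foldl_cons, List.foldl_nil]
      rw [this]
      have harg : 2 * (n / 2) + (if (n % 2 == 1) then 1 else 0) = n := by
        by_cases hp : n % 2 = 1 <;> simp [hp] <;> omega
      rw [harg]

-- ===== VERDICT (by name: the statement is the Claim_ definition above) =====
theorem fastmatrix_spec : Claim_equal_fastmatrix := by
  intro matrix X _ hpre
  unfold Spec_fastmatrix fastmatrix fastmatrix_alt pvBinSlice3
  have hX : 1 ≤ X.toNat := by
    have := hpre.1
    omega
  rw [if_neg (by omega : ¬ X < 0), ← pvFold_eq matrix X.toNat hX]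
  rfl
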